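-- pv_equiv track=rewrite | github.com/Rapid1898-code/Advent-Of-Code | Adven04 Part1.py | check_pw
-- ===== SOURCE A (Python) =====
-- def check_pw(zahl):
--     doppel = False
--     zahl_str = str(zahl)
--     for i in range(0, len(zahl_str)-1):
--       if zahl_str[i]>zahl_str[i+1]:
--         return False
--       if zahl_str[i]==zahl_str[i+1]:
--         doppel = True
--     if doppel == True:
--       return True
--     else:
--       return False
-- ===== SOURCE B (Python) =====
-- def check_pw(zahl):
--     s = str(zahl)
--     if s != ''.join(sorted(s)):
--         return False
--     return any(a == b for a, b in zip(s, s[1:]))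
-- ===== Notes on version B (the rewrite author's own statement) =====
-- stated objective: simpler
-- what changed: Replaced the fused early-returning index loop carrying a doppel flag with a declarative decomposition: a sort-based monotonicity test (s equals sorted(s)) followed by an independent adjacent-pair duplicate scan over zip(s, s[1:]).
import Mathlib
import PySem

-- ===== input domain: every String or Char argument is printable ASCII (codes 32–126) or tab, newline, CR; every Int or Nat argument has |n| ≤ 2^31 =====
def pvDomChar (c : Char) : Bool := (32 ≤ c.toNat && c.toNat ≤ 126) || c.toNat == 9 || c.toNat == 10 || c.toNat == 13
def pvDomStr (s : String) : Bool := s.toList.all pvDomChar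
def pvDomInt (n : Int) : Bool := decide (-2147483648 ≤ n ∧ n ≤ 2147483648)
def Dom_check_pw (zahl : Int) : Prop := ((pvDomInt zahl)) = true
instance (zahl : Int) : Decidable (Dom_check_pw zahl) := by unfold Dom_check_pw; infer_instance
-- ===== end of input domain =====

-- B replaces A's fused early-returning loop with a sorted-equality monotonicity test
-- plus an independent adjacent-duplicate scan (objective: simpler).

-- ===== PORT A =====
-- the for-loop over i in range(0, len-1): structural recursion over the digit chars,
-- comparing each char with its successor, carrying the 'doppel' flag; early return False on descent
def pvLoopA : List Char → Bool → Bool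
  | a :: b :: rest, doppel =>
      if a > b then false
      else pvLoopA (b :: rest) (doppel || a == b)
  | _, doppel => doppel

def check_pw (zahl : Int) : Bool :=
  let zahl_str := (PySem.Int.toStr zahl).toList
  pvLoopA zahl_str false

-- ===== PORT B =====
def check_pw_alt (zahl : Int) : Bool :=
  let s := (PySem.Int.toStr zahl).toList
  if s ≠ PySem.List.sorted s (fun x => x) false then false
  else (s.zip s.tail).any (fun p => p.1 == p.2)

-- ===== PRECONDITION & SPEC =====
def Spec_check_pw (zahl : Int) (out : Bool) : Prop := out = check_pw_alt zahl
instance (zahl : Int) (out : Bool) : Decidable (Spec_check_pw zahl out) := by unfold Spec_check_pw; infer_instance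

-- ===== CLAIM (what is proved, stated in full; the proofs are below) =====
def Claim_equal_check_pw : Prop := ∀ (zahl : Int), Dom_check_pw zahl → Spec_check_pw zahl (check_pw zahl)

-- ===== LEMMAS AND PROOFS =====

-- ===== VERDICT (by name: the statement is the Claim_ definition above) =====
-- any adjacent equal pair, as B scans it
def pvAdj (s : List Char) : Bool := (s.zip s.tail).any (fun p => p.1 == p.2)

-- non-decreasing adjacent pairs, as a Boolean characterisation of A's descent test
def pvMono : List Char → Bool
  | a :: b :: r => (a ≤ b : Bool) && pvMono (b :: r)
  | _ => true

theorem pvLoopA_char (s : List Char) (d : Bool) :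
    pvLoopA s d = (pvMono s && (d || pvAdj s)) := by
  induction s generalizing d with
  | nil => simp [pvLoopA, pvMono, pvAdj]
  | cons a t ih =>
    cases t with
    | nil => simp [pvLoopA, pvMono, pvAdj]
    | cons b r =>
      rw [pvLoopA, ih, pvMono]
      simp only [pvAdj, List.zip]
      by_cases hgt : a > b
      · simp [hgt, not_le.mpr hgt]
      · have hle : a ≤ b := not_lt.mp hgt
        by_cases heq : a = b <;> simp [hgt, hle, heq, Bool.or_assoc]

theorem pvMono_iff_pairwise (s : List Char) :
    pvMono s = true ↔ s.Pairwise (· ≤ ·) := by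
  rw [← List.isChain_iff_pairwise]
  induction s with
  | nil => simp [pvMono]
  | cons a t ih =>
    cases t with
    | nil => simp [pvMono]
    | cons b r =>
      rw [pvMono, List.isChain_cons_cons]
      simp [ih]

theorem pvMono_iff_sorted (s : List Char) :
    pvMono s = true ↔ s = PySem.List.sorted s (fun x => x) false := by
  rw [pvMono_iff_pairwise]
  constructor
  · intro h
    exact (PySem.List.sorted_eq_self_of_pairwise s (fun x => x) h).symm
  · intro h
    have := PySem.List.sorted_pairwise (xs := s) (key := fun x => x) (κ := Char)
    rw [← h] at this
    exact this

theorem check_pw_key (s : List Char) :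
    pvLoopA s false =
      (if s ≠ PySem.List.sorted s (fun x => x) false then false
       else (s.zip s.tail).any (fun p => p.1 == p.2)) := by
  rw [pvLoopA_char]
  by_cases h : s = PySem.List.sorted s (fun x => x) false
  · rw [if_neg (not_not_intro h), (pvMono_iff_sorted s).mpr h]
    simp [pvAdj]
  · have hm : pvMono s = false := by
      cases hmv : pvMono s
      · rfl
      · exact absurd ((pvMono_iff_sorted s).mp hmv) h
    rw [if_pos h, hm]
    simp

theorem check_pw_spec : Claim_equal_check_pw := by
  intro zahl _
  unfold Spec_check_pw check_pw check_pw_alt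
  exact check_pw_key _
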